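-- pv_equiv track=rewrite | github.com/SeongHoonHa/ComputerScience-Assignments | Assignment4/a4.py | find_num_min
-- ===== SOURCE A (Python) =====
-- def find_num_min(xlst):
--     if len(xlst) == 0:                #making an exception
--         return ()
--     else:
--         minimum = min(xlst)
--         cnt = 0
--         for i in xlst:
--             if minimum == i:
--                 cnt = cnt + 1           #updating the number of the minimum number
--         return (minimum,cnt)
-- ===== SOURCE B (Python) =====
-- def find_num_min(xlst):
--     if len(xlst) == 0:
--         return ()
--     minimum = xlst[0]
--     cnt = 0
--     for i in xlst:
--         if i < minimum:
--             minimum = i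
--             cnt = 1
--         elif i == minimum:
--             cnt = cnt + 1
--     return (minimum, cnt)
-- ===== Notes on version B (the rewrite author's own statement) =====
-- stated objective: alternative
-- what changed: B fuses A's separate min() scan and counting loop into one accumulator pass that tracks the running minimum and resets/increments its count.
-- outside the precondition, e.g. on find_num_min([]): A returns (), B returns ()
import Mathlib
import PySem

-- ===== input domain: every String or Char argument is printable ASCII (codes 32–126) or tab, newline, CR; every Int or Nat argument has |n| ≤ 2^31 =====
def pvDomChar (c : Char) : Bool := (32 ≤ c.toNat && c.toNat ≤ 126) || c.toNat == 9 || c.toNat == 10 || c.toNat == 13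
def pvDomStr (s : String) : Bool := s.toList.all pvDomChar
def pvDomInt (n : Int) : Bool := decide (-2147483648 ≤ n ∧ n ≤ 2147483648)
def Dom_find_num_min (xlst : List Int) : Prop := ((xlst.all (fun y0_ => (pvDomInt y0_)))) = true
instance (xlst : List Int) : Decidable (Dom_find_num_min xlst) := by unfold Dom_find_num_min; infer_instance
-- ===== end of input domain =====

-- B fuses A's separate min() scan and counting loop into one accumulator pass (single pass, same O(n) cost).
-- ===== PORT A =====
-- A: min(xlst) first, then a second loop counting occurrences of the minimum.
def find_num_min (xlst : List Int) : Int × Int :=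
  if xlst.length = 0 then (0, 0)   -- excluded by Pre_: Python A returns () here, not an int pair
  else
    let minimum := (PySem.List.min? xlst (fun x => x)).getD 0
    let cnt := xlst.foldl (fun cnt i => if minimum == i then cnt + 1 else cnt) (0 : Int)
    (minimum, cnt)

-- ===== PORT B =====
-- B: one pass; running minimum starts at xlst[0], count resets to 1 on a strictly smaller element.
def find_num_min_alt (xlst : List Int) : Int × Int :=
  match xlst with
  | [] => (0, 0)   -- excluded by Pre_: Python B returns () here, not an int pair
  | x :: _ =>
    xlst.foldl
      (fun p i => if i < p.1 then (i, 1) else if i = p.1 then (p.1, p.2 + 1) else p)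
      (x, (0 : Int))

-- ===== PRECONDITION & SPEC =====
-- Pre_ excludes only the empty list, on which the Python returns (), not a value of type int × int.
def Pre_find_num_min (xlst : List Int) : Prop := xlst ≠ []
instance (xlst : List Int) : Decidable (Pre_find_num_min xlst) := by unfold Pre_find_num_min; infer_instance
def pvWitness_find_num_min : List Int := [3, 1, 2, 1]

def Spec_find_num_min (xlst : List Int) (out : Int × Int) : Prop := out = find_num_min_alt xlst
instance (xlst : List Int) (out : Int × Int) : Decidable (Spec_find_num_min xlst out) := by unfold Spec_find_num_min; infer_instance

-- ===== CLAIM (what is proved, stated in full; the proofs are below) =====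
def Claim_equal_find_num_min : Prop := ∀ (xlst : List Int), Dom_find_num_min xlst → Pre_find_num_min xlst → Spec_find_num_min xlst (find_num_min xlst)

-- ===== LEMMAS AND PROOFS =====

-- A's counting loop just adds the number of occurrences of m.
lemma countfold (m : Int) (l : List Int) : ∀ c : Int,
    l.foldl (fun c i => if m == i then c + 1 else c) c = c + (l.count m : Int) := by
  induction l with
  | nil => intro c; simp
  | cons i t ih =>
    intro c
    rw [List.foldl_cons, ih]
    rcases eq_or_ne m i with h | h
    · subst h; simp; ring
    · simp [h, Ne.symm h]

-- B's fused loop computes the running minimum and the count of the minimum among the seen elements.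
lemma bfold (l : List Int) : ∀ m c : Int,
    l.foldl (fun p i => if i < p.1 then (i, (1 : Int)) else if i = p.1 then (p.1, p.2 + 1) else p) (m, c)
      = (l.foldl min m,
         if l.foldl min m < m then (l.count (l.foldl min m) : Int)
         else c + (l.count (l.foldl min m) : Int)) := by
  induction l with
  | nil => intro m c; simp
  | cons i t ih =>
    intro m c
    have hle : t.foldl min (min m i) ≤ min m i := (PySem.List.foldl_min_le t (min m i)).1
    simp only [List.foldl_cons]
    rcases lt_trichotomy i m with h | h | h
    · -- i < m : reset to (i, 1)
      rw [if_pos h, ih i 1]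
      have hmin : min m i = i := min_eq_right h.le
      rw [hmin] at hle ⊢
      rcases eq_or_lt_of_le hle with he | hlt
      · simp only [he, lt_irrefl, if_pos h, List.count_cons, beq_self_eq_true]
        push_cast; ring_nf
      · have hne : (i == t.foldl min i) = false := by
          simp [beq_eq_false_iff_ne]; omega
        simp only [if_pos hlt, if_pos (lt_trans hlt h), List.count_cons, hne]
        simp
    · -- i = m : count + 1
      subst h
      rw [if_neg (lt_irrefl i), if_pos rfl, ih i (c + 1)]
      have hmin : min i i = i := min_self i
      rw [hmin] at hle ⊢
      rcases eq_or_lt_of_le hle with he | hlt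
      · simp only [he, lt_irrefl, List.count_cons, beq_self_eq_true]
        push_cast; ring_nf
      · have hne : (i == t.foldl min i) = false := by
          simp [beq_eq_false_iff_ne]; omega
        simp only [if_pos hlt, List.count_cons, hne]
        simp
    · -- i > m : unchanged
      have h1 : ¬ i < m := by omega
      have h2 : i ≠ m := by omega
      rw [if_neg h1, if_neg h2, ih m c]
      have hmin : min m i = m := min_eq_left h.le
      rw [hmin] at hle ⊢
      have hne : (i == t.foldl min m) = false := by
        simp [beq_eq_false_iff_ne]; omega
      simp only [List.count_cons, hne]
      simp

-- ===== VERDICT (by name: the statement is the Claim_ definition above) =====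
theorem find_num_min_spec : Claim_equal_find_num_min := by
  intro xlst _ hpre
  unfold Spec_find_num_min find_num_min find_num_min_alt
  match xlst with
  | [] => exact absurd rfl hpre
  | x :: t =>
    simp only [List.length_cons, Nat.succ_ne_zero, if_false,
      PySem.List.min?_id_cons, Option.getD_some]
    rw [countfold, bfold]
    have hle : t.foldl min x ≤ x := (PySem.List.foldl_min_le t x).1
    simp only [List.foldl_cons, min_self]
    rcases eq_or_lt_of_le hle with he | hlt
    · rw [he]; simp
    · have hne : (x == t.foldl min x) = false := by
        simp [beq_eq_false_iff_ne]; omega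
      simp only [if_pos hlt, List.count_cons, hne]
      simp
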